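-- pv_equiv track=rewrite | github.com/pypi-data/pypi-mirror-186 | packages/scrapetools/scrapetools-0.1.0-py3-none-any.whl/scrapeTools/emailScraper.py | findLastValidCharacterOffset
-- ===== SOURCE A (Python) =====
-- from string import printable
--
-- def findLastValidCharacterOffset(text: str) -> int:
--     """Iterates through a string to find the index of the last valid character,
--     assuming that string either starts or ends with '@'.
--
--     If the string doesn't start or end with '@', an Exception is raised.
--
--     Returns the number of valid characters between '@' and first invalid character.
--     e.g. '@abcde%' will return 5 and '#123@' will return 3.
--
--     If no invalid characters are found, the function will return
--     'len(text)-1'."""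
--
--     """ Technically some of these characters are valid in an email string,
--     but the ratio of how often they're used to how often they produce
--     false positives makes them worth disregarding. """
--     invalidCharacters = " <>[]{},\"':;\\/#$%^&*()=+`?|\n\t\r"
--     if text[-1] == "@" and text[0] != "@":
--         # reverse the string
--         text = text[::-1]
--     elif text[0] != "@":
--         raise ValueError(
--             'First or last character of text arg needs to be "@"\n',
--             f"Argument {text} is invalid.",
--         )
--     i = 1
--     while i < len(text):
--         if text[i] in invalidCharacters or text[i] not in printable:
--             return i - 1
--         else:
--             i += 1
--     return len(text) - 1
-- ===== SOURCE B (Python) =====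
-- from string import printable
--
-- _INVALID = " <>[]{},\"':;\\/#$%^&*()=+`?|\n\t\r"
-- # valid characters = printable minus the disallowed ones
-- _VALID = "".join(c for c in printable if c not in _INVALID)
--
--
-- def findLastValidCharacterOffset(text: str) -> int:
--     if text[-1] == "@" and text[0] != "@":
--         text = text[::-1]
--     elif text[0] != "@":
--         raise ValueError(
--             'First or last character of text arg needs to be "@"\n',
--             f"Argument {text} is invalid.",
--         )
--     body = text[1:]
--     # offset = length of the valid prefix after '@'; lstrip removes exactly it
--     return len(body) - len(body.lstrip(_VALID))
-- ===== Notes on version B (the rewrite author's own statement) =====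
-- stated objective: idiomatic
-- what changed: Replaces the explicit index loop with early return by precomputing the valid-character set (printable minus invalid) once and computing the answer as the length of the valid prefix of text[1:] via str.lstrip, removing all index arithmetic.
import Mathlib
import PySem

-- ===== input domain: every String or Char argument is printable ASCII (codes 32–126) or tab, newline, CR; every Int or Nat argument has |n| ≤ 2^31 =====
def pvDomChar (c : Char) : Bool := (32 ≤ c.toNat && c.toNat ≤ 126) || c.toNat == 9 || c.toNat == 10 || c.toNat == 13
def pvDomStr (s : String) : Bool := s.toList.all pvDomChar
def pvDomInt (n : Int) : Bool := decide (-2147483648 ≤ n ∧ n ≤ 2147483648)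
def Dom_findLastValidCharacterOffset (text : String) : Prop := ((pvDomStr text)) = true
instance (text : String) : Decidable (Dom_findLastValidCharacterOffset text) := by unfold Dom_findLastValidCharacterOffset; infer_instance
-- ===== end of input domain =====

-- B computes the answer as the length of the valid prefix of text[1:] (Python str.lstrip over a
-- precomputed valid-character string) instead of A's explicit index loop; objective: idiomatic.

-- ===== PORT A =====
-- invalidCharacters = " <>[]{},\"':;\\/#$%^&*()=+`?|\n\t\r"
def invalidCharacters : List Char := " <>[]{},\"':;\\/#$%^&*()=+`?|\n\t\r".toList
-- string.printable (literal)
def printableChars : List Char :=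
  "0123456789abcdefghijklmnopqrstuvwxyzABCDEFGHIJKLMNOPQRSTUVWXYZ!\"#$%&'()*+,-./:;<=>?@[\\]^_`{|}~ \t\n\r\x0b\x0c".toList

-- the while-loop of A: while i < len(text): if text[i] in invalid or text[i] not in printable: return i-1 else i += 1
def aWhile (l : List Char) (i : Nat) : Int :=
  if h : i < l.length then
    if invalidCharacters.contains l[i] || !(printableChars.contains l[i]) then
      (i : Int) - 1
    else
      aWhile l (i + 1)
  else
    (l.length : Int) - 1
termination_by l.length - i

def findLastValidCharacterOffset (text : String) : Int :=
  match PySem.Str.pyGet? text (-1), PySem.Str.pyGet? text 0 with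
  | some last, some first =>
      -- if text[-1] == "@" and text[0] != "@": text = text[::-1]  (elif text[0] != "@": raise — outside Pre_)
      let t := if last == '@' && first != '@' then String.ofList text.toList.reverse else text
      aWhile t.toList 1
  | _, _ => 0  -- IndexError on empty text — outside Pre_

-- ===== PORT B =====
-- _VALID = "".join(c for c in printable if c not in _INVALID)
def validCharacters : List Char := printableChars.filter (fun c => !(invalidCharacters.contains c))

def findLastValidCharacterOffset_alt (text : String) : Int :=
  match PySem.Str.pyGet? text (-1) with
  | none => 0  -- IndexError on empty text — outside Pre_
  | some last =>
    match PySem.Str.pyGet? text 0 with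
    | none => 0
    | some first =>
      let t := if last == '@' && first != '@' then String.ofList text.toList.reverse else text
      let body := t.toList.drop 1                                   -- body = text[1:]
      -- body.lstrip(_VALID) drops exactly the leading chars that lie in _VALID (exact port of str.lstrip(chars))
      (body.length : Int) - (body.dropWhile (fun c => validCharacters.contains c)).length

-- ===== PRECONDITION & SPEC =====
-- Pre_ excludes exactly the inputs where Python A raises: the empty string (IndexError) and
-- strings that neither start nor end with '@' (ValueError).
def Pre_findLastValidCharacterOffset (text : String) : Prop :=
  text.toList ≠ [] ∧ (text.toList.head? = some '@' ∨ text.toList.getLast? = some '@')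
instance (text : String) : Decidable (Pre_findLastValidCharacterOffset text) := by
  unfold Pre_findLastValidCharacterOffset; infer_instance
def pvWitness_findLastValidCharacterOffset : String := "@abc"

def Spec_findLastValidCharacterOffset (text : String) (out : Int) : Prop :=
  out = findLastValidCharacterOffset_alt text
instance (text : String) (out : Int) : Decidable (Spec_findLastValidCharacterOffset text out) := by
  unfold Spec_findLastValidCharacterOffset; infer_instance

-- ===== CLAIM (what is proved, stated in full; the proofs are below) =====
def Claim_equal_findLastValidCharacterOffset : Prop :=
  ∀ (text : String), Dom_findLastValidCharacterOffset text →
    Pre_findLastValidCharacterOffset text →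
    Spec_findLastValidCharacterOffset text (findLastValidCharacterOffset text)

-- ===== LEMMAS AND PROOFS =====
-- A's loop from index i computes i + (length of the valid prefix of (l.drop i)) - 1, for i ≤ len.
theorem aWhile_eq (l : List Char) :
    ∀ i, i ≤ l.length →
      aWhile l i =
        (i : Int) + ((l.drop i).takeWhile (fun c => validCharacters.contains c)).length - 1 := by
  intro i hi
  induction h : l.length - i generalizing i with
  | zero =>
      have : i = l.length := by omega
      subst this
      rw [aWhile]
      simp
  | succ n ih =>
      have hlt : i < l.length := by omega
      rw [aWhile]
      rw [List.drop_eq_getElem_cons hlt]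
      simp only [hlt, dif_pos, List.takeWhile_cons]
      have hmem : ∀ c : Char, validCharacters.contains c = true ↔
          (printableChars.contains c = true ∧ invalidCharacters.contains c = false) := by
        intro c
        simp [validCharacters, List.mem_filter]
      cases hv : validCharacters.contains l[i] with
      | true =>
          obtain ⟨hp, hni⟩ := (hmem _).mp hv
          have hb : (invalidCharacters.contains l[i] || !(printableChars.contains l[i])) = false := by
            rw [hni, hp]; rfl
          rw [hb]
          simp only [Bool.false_eq_true, if_false]
          rw [ih (i + 1) (by omega) (by omega)]
          simp
          ring
      | false =>
          have hnb : ¬ (printableChars.contains l[i] = true ∧ invalidCharacters.contains l[i] = false) :=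
            fun h => by rw [(hmem _).mpr h] at hv; exact Bool.noConfusion hv
          have hb : (invalidCharacters.contains l[i] || !(printableChars.contains l[i])) = true := by
            cases hinv : invalidCharacters.contains l[i] <;>
              cases hp : printableChars.contains l[i] <;> simp_all
          rw [hb]
          simp

-- ===== VERDICT (by name: the statement is the Claim_ definition above) =====
theorem findLastValidCharacterOffset_spec : Claim_equal_findLastValidCharacterOffset := by
  intro text _ hpre
  unfold Spec_findLastValidCharacterOffset
  unfold findLastValidCharacterOffset findLastValidCharacterOffset_alt
  obtain ⟨hne, _⟩ := hpre
  cases hlast : PySem.Str.pyGet? text (-1) with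
  | none => cases hfirst : PySem.Str.pyGet? text 0 <;> rfl
  | some last =>
    cases hfirst : PySem.Str.pyGet? text 0 with
    | none => rfl
    | some first =>
      simp only
      set t := if last == '@' && first != '@' then String.ofList text.toList.reverse else text with ht
      have h1 : 1 ≤ t.toList.length := by
        have hlen0 : t.toList.length = text.toList.length := by
          by_cases hc : (last == '@' && first != '@') = true <;> simp [ht, hc]
        rw [hlen0]
        cases h : text.toList with
        | nil => exact absurd h hne
        | cons a as => exact Nat.succ_le_succ (Nat.zero_le _)
      rw [aWhile_eq t.toList 1 h1]
      have hsplit := List.takeWhile_append_dropWhile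
        (p := fun c => validCharacters.contains c) (l := t.toList.drop 1)
      have hlen : ((t.toList.drop 1).takeWhile (fun c => validCharacters.contains c)).length
          + ((t.toList.drop 1).dropWhile (fun c => validCharacters.contains c)).length
          = t.toList.length - 1 := by
        rw [← List.length_append, hsplit, List.length_drop]
      simp only [List.length_drop]
      rw [← hlen]
      push_cast
      ring
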